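-- pv_equiv track=rewrite | github.com/ElijahDR/adventofcode | day10.py | getExtremes
-- ===== SOURCE A (Python) =====
-- arrSize = 1000000
--
-- def getExtremes(data):
--     extremes = [arrSize ** 2, arrSize ** 2, 0, 0, 0, 0]
--     extremes[0] = min(p[0] for p in data)
--     extremes[1] = min(p[1] for p in data)
--     extremes[2] = max(p[0] for p in data)
--     extremes[3] = max(p[1] for p in data)
--
--     extremes[4] = extremes[2] - extremes[0]
--     extremes[5] = extremes[3] - extremes[1]
--
--     return extremes
-- ===== SOURCE B (Python) =====
-- def getExtremes(data):
--     # single pass: initialize from the first point, update all four bounds together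
--     (min_x, min_y) = data[0]
--     max_x, max_y = min_x, min_y
--     for (x, y) in data[1:]:
--         if x < min_x: min_x = x
--         if y < min_y: min_y = y
--         if x > max_x: max_x = x
--         if y > max_y: max_y = y
--     return [min_x, min_y, max_x, max_y, max_x - min_x, max_y - min_y]
-- ===== Notes on version B (the rewrite author's own statement) =====
-- stated objective: alternative
-- what changed: Replaces A's four separate min/max scans over the data with a single pass that initializes all four bounds from the first point and updates them together with comparisons.
import Mathlib
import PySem

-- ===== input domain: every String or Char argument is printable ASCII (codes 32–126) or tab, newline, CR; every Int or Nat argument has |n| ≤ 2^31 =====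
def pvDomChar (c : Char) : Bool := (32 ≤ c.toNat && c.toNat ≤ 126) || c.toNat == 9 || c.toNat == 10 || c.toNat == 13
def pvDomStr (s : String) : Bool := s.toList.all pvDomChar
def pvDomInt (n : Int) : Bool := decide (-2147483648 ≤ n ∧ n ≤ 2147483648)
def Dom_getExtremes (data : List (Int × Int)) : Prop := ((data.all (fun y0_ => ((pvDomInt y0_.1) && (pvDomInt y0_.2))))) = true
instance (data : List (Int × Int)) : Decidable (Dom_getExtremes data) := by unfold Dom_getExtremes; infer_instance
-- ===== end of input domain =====

-- B performs one pass updating all four extremes instead of A's four min/max scans (alternative decomposition, same O(n)).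
-- Both Pythons raise on empty input (A: ValueError from min(), B: IndexError from data[0]); Pre_ excludes it.

-- ===== PORT A =====
-- Four separate scans: min/max of the x and y projections; .getD supplies the never-used
-- value only on empty data, which Pre_ excludes (Python raises ValueError there).
def getExtremes (data : List (Int × Int)) : List Int :=
  let e0 := (PySem.List.min? (data.map Prod.fst) (fun v => v)).getD (1000000 ^ 2)
  let e1 := (PySem.List.min? (data.map Prod.snd) (fun v => v)).getD (1000000 ^ 2)
  let e2 := (PySem.List.max? (data.map Prod.fst) (fun v => v)).getD 0
  let e3 := (PySem.List.max? (data.map Prod.snd) (fun v => v)).getD 0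
  [e0, e1, e2, e3, e2 - e0, e3 - e1]

-- ===== PORT B =====
-- Single pass: fold over the tail, updating (min_x, min_y, max_x, max_y) together.
def pvStep (a : Int × Int × Int × Int) (q : Int × Int) : Int × Int × Int × Int :=
  ( if q.1 < a.1 then q.1 else a.1
  , if q.2 < a.2.1 then q.2 else a.2.1
  , if q.1 > a.2.2.1 then q.1 else a.2.2.1
  , if q.2 > a.2.2.2 then q.2 else a.2.2.2 )

def getExtremes_alt (data : List (Int × Int)) : List Int :=
  match data with
  | [] => []   -- unreachable under Pre_ (Python B raises IndexError on [])
  | p :: rest =>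
    let r := rest.foldl pvStep (p.1, p.2, p.1, p.2)
    [r.1, r.2.1, r.2.2.1, r.2.2.2, r.2.2.1 - r.1, r.2.2.2 - r.2.1]

-- ===== PRECONDITION & SPEC =====
-- On empty data both Pythons raise (A: ValueError from min on an empty generator).
def Pre_getExtremes (data : List (Int × Int)) : Prop := data ≠ []
instance (data : List (Int × Int)) : Decidable (Pre_getExtremes data) := by unfold Pre_getExtremes; infer_instance
def pvWitness_getExtremes : (List (Int × Int)) := [(1, 2), (3, -4)]
def Spec_getExtremes (data : List (Int × Int)) (out : List Int) : Prop := out = getExtremes_alt data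
instance (data : List (Int × Int)) (out : List Int) : Decidable (Spec_getExtremes data out) := by unfold Spec_getExtremes; infer_instance

-- ===== CLAIM =====
def Claim_equal_getExtremes : Prop := ∀ (data : List (Int × Int)), Dom_getExtremes data → Pre_getExtremes data → Spec_getExtremes data (getExtremes data)

-- ===== LEMMAS AND PROOFS =====

-- B's combined fold projects to the four independent min/max folds.
theorem pvStep_foldl (rest : List (Int × Int)) (a b c d : Int) :
    rest.foldl pvStep (a, b, c, d)
      = ( (rest.map Prod.fst).foldl min a
        , (rest.map Prod.snd).foldl min b
        , (rest.map Prod.fst).foldl max c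
        , (rest.map Prod.snd).foldl max d ) := by
  induction rest generalizing a b c d with
  | nil => rfl
  | cons q t ih =>
    have hmin : ∀ u v : Int, (if u < v then u else v) = min v u := by
      intro u v; simp [min_def]; split_ifs <;> omega
    have hmax : ∀ u v : Int, (if u > v then u else v) = max v u := by
      intro u v; simp [max_def]; split_ifs <;> omega
    simp only [List.foldl_cons, List.map_cons, pvStep, hmin, hmax, ih]

-- ===== VERDICT =====
theorem getExtremes_spec : Claim_equal_getExtremes := by
  intro data _ hpre
  match data with
  | [] => exact absurd rfl hpre
  | p :: rest =>
    show getExtremes (p :: rest) = getExtremes_alt (p :: rest)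
    simp only [getExtremes, getExtremes_alt, List.map_cons,
      PySem.List.min?_id_cons, PySem.List.max?_id_cons, Option.getD_some,
      pvStep_foldl]
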